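-- pv_equiv track=rewrite | github.com/dederico/GoldenCoyotes | golden_coyotes_after_feedback.py | filter_opportunities_for_display
-- ===== SOURCE A (Python) =====
-- def filter_opportunities_for_display(opportunities, industry='', opportunity_type='', search_term=''):
--     """Filter opportunities according to the current module selections."""
--     filtered = opportunities
--
--     if industry:
--         filtered = [opp for opp in filtered if (opp.get('industry') or '') == industry]
--
--     if opportunity_type:
--         filtered = [opp for opp in filtered if (opp.get('type') or '') == opportunity_type]
--
--     if search_term:
--         search_lower = search_term.lower()
--         filtered = [
--             opp for opp in filtered
--             if search_lower in (opp.get('title') or '').lower()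
--             or search_lower in (opp.get('description') or '').lower()
--             or search_lower in (opp.get('industry') or '').lower()
--         ]
--
--     return filtered
-- ===== SOURCE B (Python) =====
-- def filter_opportunities_for_display(opportunities, industry='', opportunity_type='', search_term=''):
--     """Filter opportunities according to the current module selections (single pass)."""
--     if not (industry or opportunity_type or search_term):
--         return opportunities
--     search_lower = search_term.lower()
--
--     def keep(opp):
--         if industry and (opp.get('industry') or '') != industry:
--             return False
--         if opportunity_type and (opp.get('type') or '') != opportunity_type:
--             return False
--         if search_term:
--             return (search_lower in (opp.get('title') or '').lower()
--                     or search_lower in (opp.get('description') or '').lower()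
--                     or search_lower in (opp.get('industry') or '').lower())
--         return True
--
--     return [opp for opp in opportunities if keep(opp)]
-- ===== Notes on version B (the rewrite author's own statement) =====
-- stated objective: alternative
-- what changed: Replaced A's three sequential list-comprehension filter passes (building up to three intermediate lists) with one single-pass filter whose predicate conjoins all active criteria, short-circuiting to the original list when no filter is active.
import Mathlib
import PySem

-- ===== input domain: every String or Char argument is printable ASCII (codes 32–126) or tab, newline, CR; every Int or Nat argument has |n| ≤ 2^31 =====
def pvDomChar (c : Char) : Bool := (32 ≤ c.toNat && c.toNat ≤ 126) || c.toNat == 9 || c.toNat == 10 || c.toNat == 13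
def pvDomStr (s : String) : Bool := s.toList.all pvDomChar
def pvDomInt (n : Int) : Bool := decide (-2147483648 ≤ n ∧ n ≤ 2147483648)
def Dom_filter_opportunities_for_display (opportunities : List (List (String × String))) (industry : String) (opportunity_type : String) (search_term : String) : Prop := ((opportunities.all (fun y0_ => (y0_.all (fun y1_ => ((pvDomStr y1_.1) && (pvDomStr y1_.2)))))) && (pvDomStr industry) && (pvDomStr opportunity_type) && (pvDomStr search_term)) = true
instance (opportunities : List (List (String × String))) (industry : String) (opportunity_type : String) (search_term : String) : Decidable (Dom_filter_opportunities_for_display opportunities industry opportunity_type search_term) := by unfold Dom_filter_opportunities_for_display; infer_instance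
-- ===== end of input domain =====

-- B replaces A's three sequential filter passes with a single-pass conjunctive filter (identity when no filter is active); objective: alternative decomposition.


-- ===== PORT A =====
def fieldA (opp : List (String × String)) (k : String) : String :=
  PySem.Dict.getD ⟨opp⟩ k ""

def filter_opportunities_for_display (opportunities : List (List (String × String))) (industry : String) (opportunity_type : String) (search_term : String) : List (List (String × String)) :=
  let f0 := opportunities
  let f1 := if industry ≠ "" then f0.filter (fun opp => fieldA opp "industry" == industry) else f0
  let f2 := if opportunity_type ≠ "" then f1.filter (fun opp => fieldA opp "type" == opportunity_type) else f1
  let f3 := if search_term ≠ "" then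
      let search_lower := PySem.Str.lower search_term
      f2.filter (fun opp =>
        PySem.Str.isIn search_lower (PySem.Str.lower (fieldA opp "title")) ||
        PySem.Str.isIn search_lower (PySem.Str.lower (fieldA opp "description")) ||
        PySem.Str.isIn search_lower (PySem.Str.lower (fieldA opp "industry")))
    else f2
  f3

-- ===== PORT B =====
-- B: one pass; identity short-circuit when no filter is active.
def keepB (industry : String) (opportunity_type : String) (search_term : String) (search_lower : String) (opp : List (String × String)) : Bool :=
  if industry ≠ "" && PySem.Dict.getD ⟨opp⟩ "industry" "" != industry then false
  else if opportunity_type ≠ "" && PySem.Dict.getD ⟨opp⟩ "type" "" != opportunity_type then false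
  else if search_term ≠ "" then
    PySem.Str.isIn search_lower (PySem.Str.lower (PySem.Dict.getD ⟨opp⟩ "title" "")) ||
    PySem.Str.isIn search_lower (PySem.Str.lower (PySem.Dict.getD ⟨opp⟩ "description" "")) ||
    PySem.Str.isIn search_lower (PySem.Str.lower (PySem.Dict.getD ⟨opp⟩ "industry" ""))
  else true

def filter_opportunities_for_display_alt (opportunities : List (List (String × String))) (industry : String) (opportunity_type : String) (search_term : String) : List (List (String × String)) :=
  if industry == "" && opportunity_type == "" && search_term == "" then opportunities
  else
    let search_lower := PySem.Str.lower search_term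
    opportunities.filter (keepB industry opportunity_type search_term search_lower)

-- ===== PRECONDITION & SPEC =====
def Spec_filter_opportunities_for_display (opportunities : List (List (String × String))) (industry : String) (opportunity_type : String) (search_term : String) (out : List (List (String × String))) : Prop := out = filter_opportunities_for_display_alt opportunities industry opportunity_type search_term
instance (opportunities : List (List (String × String))) (industry : String) (opportunity_type : String) (search_term : String) (out : List (List (String × String))) : Decidable (Spec_filter_opportunities_for_display opportunities industry opportunity_type search_term out) := by unfold Spec_filter_opportunities_for_display; infer_instance

-- ===== CLAIM (what is proved, stated in full; the proofs are below) =====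
def Claim_equal_filter_opportunities_for_display : Prop := ∀ (opportunities : List (List (String × String))) (industry : String) (opportunity_type : String) (search_term : String), Dom_filter_opportunities_for_display opportunities industry opportunity_type search_term → Spec_filter_opportunities_for_display opportunities industry opportunity_type search_term (filter_opportunities_for_display opportunities industry opportunity_type search_term)

-- ===== LEMMAS AND PROOFS =====

-- ===== VERDICT (by name: the statement is the Claim_ definition above) =====
theorem filter_opportunities_for_display_spec : Claim_equal_filter_opportunities_for_display := by
  intro opportunities industry opportunity_type search_term _
  unfold Spec_filter_opportunities_for_display
  unfold filter_opportunities_for_display filter_opportunities_for_display_alt keepB fieldA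
  by_cases hi : industry = "" <;> by_cases ht : opportunity_type = "" <;> by_cases hs : search_term = "" <;>
    simp [hi, ht, hs, List.filter_filter] <;>
    (apply List.filter_congr; intro opp _;
     by_cases h1 : PySem.Dict.getD ⟨opp⟩ "industry" "" = industry <;>
     by_cases h2 : PySem.Dict.getD ⟨opp⟩ "type" "" = opportunity_type <;>
     simp [h1, h2])
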